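-- pv_equiv track=rewrite | github.com/dan5252/gerrit-topic-picker | topic.py | addGerritQuery
-- ===== SOURCE A (Python) =====
-- def addGerritQuery(query_string, field_name, target_values):
--     """ Add a query for a specific field.
--     """
--     if not type(target_values) is list:
--         target_values = [target_values]
--
--     if len(target_values) == 0:
--         return query_string
--     elif len(target_values) == 1:
--         return '{} {}:"{}"'.format(query_string, field_name, target_values[0])
--     else:
--         assemble = '{} ({}:"{}"'.format(query_string, field_name, target_values[0])
--         for val in target_values[1:]:
--             assemble = '{} OR {}:"{}"'.format(assemble, field_name, val)
--         assemble = assemble + ')'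
--         return assemble
-- ===== SOURCE B (Python) =====
-- def addGerritQuery(query_string, field_name, target_values):
--     """ Add a query for a specific field. """
--     if not type(target_values) is list:
--         target_values = [target_values]
--
--     if len(target_values) == 0:
--         return query_string
--     terms = ['{}:"{}"'.format(field_name, v) for v in target_values]
--     joined = ' OR '.join(terms)
--     if len(target_values) == 1:
--         return '{} {}'.format(query_string, joined)
--     return '{} ({})'.format(query_string, joined)
-- ===== Notes on version B (the rewrite author's own statement) =====
-- stated objective: simpler
-- what changed: Replaces A's first-element-special incremental string-accumulator loop with a uniform build-all-terms list comprehension plus a single ' OR '.join, choosing the parenthesised wrapper by the value count.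
import Mathlib
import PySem

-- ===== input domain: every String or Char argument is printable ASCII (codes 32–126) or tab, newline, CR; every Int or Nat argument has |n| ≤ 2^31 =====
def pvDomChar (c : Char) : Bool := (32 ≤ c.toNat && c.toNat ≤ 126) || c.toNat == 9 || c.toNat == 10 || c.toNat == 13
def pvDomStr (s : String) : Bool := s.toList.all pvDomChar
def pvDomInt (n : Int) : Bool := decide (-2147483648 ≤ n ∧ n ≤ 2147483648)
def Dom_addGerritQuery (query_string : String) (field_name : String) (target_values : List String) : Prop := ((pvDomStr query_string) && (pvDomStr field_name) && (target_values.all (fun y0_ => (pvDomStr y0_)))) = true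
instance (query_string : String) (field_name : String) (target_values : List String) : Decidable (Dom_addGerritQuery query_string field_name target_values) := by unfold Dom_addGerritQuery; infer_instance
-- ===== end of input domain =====

-- ===== PORT A =====
-- literal transliteration of A: length-cased branches; the multi-value branch folds over the
-- tail extending an accumulator string. (target_values is already a list under the type
-- convention, so A's wrapping branch is a no-op.)
def addGerritQuery (query_string : String) (field_name : String) (target_values : List String) : String :=
  match target_values with
  | [] => query_string
  | [v] => query_string ++ " " ++ field_name ++ ":\"" ++ v ++ "\""
  | v :: rest =>
    let assemble := query_string ++ " (" ++ field_name ++ ":\"" ++ v ++ "\""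
    let assemble := rest.foldl (fun a val => a ++ " OR " ++ field_name ++ ":\"" ++ val ++ "\"") assemble
    assemble ++ ")"

-- ===== PORT B =====
-- port of Source B: map every value to its term, join with " OR ", then pick the wrapper by count
def addGerritQuery_alt (query_string : String) (field_name : String) (target_values : List String) : String :=
  if target_values = [] then query_string
  else
    let terms := target_values.map (fun v => field_name ++ ":\"" ++ v ++ "\"")
    let joined := PySem.Str.join " OR " terms
    if target_values.length = 1 then query_string ++ " " ++ joined
    else query_string ++ " (" ++ joined ++ ")"
-- B builds all terms and joins them once; one honest line: simpler uniform build-then-join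
-- decomposition, same cost as A.

-- ===== PRECONDITION & SPEC =====
def Spec_addGerritQuery (query_string : String) (field_name : String) (target_values : List String) (out : String) : Prop := out = addGerritQuery_alt query_string field_name target_values
instance (query_string : String) (field_name : String) (target_values : List String) (out : String) : Decidable (Spec_addGerritQuery query_string field_name target_values out) := by unfold Spec_addGerritQuery; infer_instance

-- ===== CLAIM (what is proved, stated in full; the proofs are below) =====
def Claim_equal_addGerritQuery : Prop := ∀ (query_string : String) (field_name : String) (target_values : List String), Dom_addGerritQuery query_string field_name target_values → Spec_addGerritQuery query_string field_name target_values (addGerritQuery query_string field_name target_values)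

-- ===== LEMMAS AND PROOFS =====

-- glueing a separator already folded into the head term back out of a Chars-level join
theorem pvJoinGlue (sep x y : List Char) (l : List (List Char)) :
    PySem.Chars.join sep ((x ++ sep ++ y) :: l)
      = x ++ sep ++ PySem.Chars.join sep (y :: l) := by
  cases l with
  | nil => simp [PySem.Chars.join_singleton]
  | cons c l' =>
      rw [PySem.Chars.join_cons_cons, PySem.Chars.join_cons_cons]
      simp [List.append_assoc]

-- A's accumulator loop over the tail equals the prefix followed by B's join
theorem pvFoldJoin (fn : String) (rest : List String) : ∀ (p x : String),
    (rest.foldl (fun a val => a ++ " OR " ++ fn ++ ":\"" ++ val ++ "\"") (p ++ x)).toList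
      = p.toList ++ PySem.Chars.join " OR ".toList
          (x.toList :: rest.map (fun v => (fn ++ ":\"" ++ v ++ "\"").toList)) := by
  induction rest with
  | nil => intro p x; simp [PySem.Chars.join_singleton, String.toList_append]
  | cons b t ih =>
      intro p x
      have hacc : p ++ x ++ " OR " ++ fn ++ ":\"" ++ b ++ "\""
          = p ++ (x ++ " OR " ++ fn ++ ":\"" ++ b ++ "\"") := by
        simp [String.append_assoc]
      rw [List.foldl_cons]
      rw [hacc, ih p (x ++ " OR " ++ fn ++ ":\"" ++ b ++ "\"")]
      have hx : (x ++ " OR " ++ fn ++ ":\"" ++ b ++ "\"").toList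
          = x.toList ++ " OR ".toList ++ (fn ++ ":\"" ++ b ++ "\"").toList := by
        simp [String.toList_append, List.append_assoc]
      rw [hx, pvJoinGlue]
      simp [PySem.Chars.join_cons_cons, List.append_assoc]

-- ===== VERDICT (by name: the statement is the Claim_ definition above) =====
theorem addGerritQuery_spec : Claim_equal_addGerritQuery := by
  intro q fn tv _
  unfold Spec_addGerritQuery addGerritQuery addGerritQuery_alt
  match tv with
  | [] => rfl
  | [v] =>
      rw [← String.toList_inj]
      simp [PySem.Str.join, PySem.Chars.join_singleton, String.toList_append,
        String.toList_ofList, List.append_assoc]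
  | v :: b :: rest =>
      rw [← String.toList_inj]
      have hacc : q ++ " (" ++ fn ++ ":\"" ++ v ++ "\""
          = (q ++ " (") ++ (fn ++ ":\"" ++ v ++ "\"") := by
        simp [String.append_assoc]
      simp only [hacc]
      rw [String.toList_append, pvFoldJoin fn (b :: rest) (q ++ " (") (fn ++ ":\"" ++ v ++ "\"")]
      simp [PySem.Str.join, String.toList_append, String.toList_ofList,
        List.map_map, Function.comp_def, List.append_assoc]
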